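-- pv_equiv track=rewrite | github.com/pypi-data/pypi-mirror-403 | packages/python-lsp-mcp/python_lsp_mcp-0.2.0.tar.gz/python_lsp_mcp-0.2.0/src/rope_mcp/rope_client.py | offset_to_position
-- ===== SOURCE A (Python) =====
-- def offset_to_position(source: str, offset: int) -> tuple[int, int]:
--     """Convert byte offset to (line, column).
--
--     Args:
--         source: The source code string
--         offset: 0-based byte offset
--
--     Returns:
--         Tuple of (1-based line, 1-based column)
--     """
--     lines = source.splitlines(keepends=True)
--     current_offset = 0
--     for i, line_text in enumerate(lines):
--         if current_offset + len(line_text) > offset: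
--             return (i + 1, offset - current_offset + 1)
--         current_offset += len(line_text)
--     # Offset is at the end
--     return (len(lines), len(lines[-1]) + 1 if lines else 1)
-- ===== SOURCE B (Python) =====
-- def offset_to_position(source: str, offset: int) -> tuple[int, int]:
--     """Convert byte offset to (line, column) via prefix sums + binary search."""
--     lines = source.splitlines(keepends=True)
--     cum = []
--     total = 0
--     for line_text in lines:
--         total += len(line_text)
--         cum.append(total)
--     # bisect_right(cum, offset): first index whose cumulative end exceeds offset
--     lo, hi = 0, len(cum)
--     while lo < hi:
--         mid = (lo + hi) // 2
--         if cum[mid] <= offset: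
--             lo = mid + 1
--         else:
--             hi = mid
--     if lo < len(lines):
--         start = cum[lo - 1] if lo > 0 else 0
--         return (lo + 1, offset - start + 1)
--     return (len(lines), len(lines[-1]) + 1 if lines else 1)
-- ===== Notes on version B (the rewrite author's own statement) =====
-- stated objective: alternative
-- what changed: Replaces A's single enumerate-and-accumulate scan that tests each line in turn with a prefix table of cumulative line-end offsets plus a hand-written bisect_right binary search that locates the containing line.
import Mathlib
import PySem

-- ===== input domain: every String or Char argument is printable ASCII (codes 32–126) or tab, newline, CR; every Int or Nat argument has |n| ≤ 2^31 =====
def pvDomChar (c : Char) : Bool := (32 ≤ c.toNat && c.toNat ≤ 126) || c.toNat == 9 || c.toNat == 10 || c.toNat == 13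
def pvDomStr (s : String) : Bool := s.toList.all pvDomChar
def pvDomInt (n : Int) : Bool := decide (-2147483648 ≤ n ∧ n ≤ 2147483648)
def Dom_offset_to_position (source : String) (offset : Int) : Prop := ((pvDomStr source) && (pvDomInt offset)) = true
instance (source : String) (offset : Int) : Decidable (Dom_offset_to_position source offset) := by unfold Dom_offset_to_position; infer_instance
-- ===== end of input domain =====

-- B replaces A's accumulate-and-test scan over the lines by a prefix table of cumulative
-- line-end offsets plus a binary search (bisect_right); objective: alternative algorithm.

-- ===== PORT A =====
-- str.splitlines(keepends=True), hand-ported (PySem has only the keepends=False form).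
-- Exact on the Dom character set, whose only line breaks are '\n', '\r' and '\r\n'
-- (Python's extra break characters \v \f \x1c-\x1e \x85 … lie outside Dom).
def splitlinesKeep : List Char → List Char → List (List Char)
  | [], acc => if acc.isEmpty then [] else [acc.reverse]
  | '\r' :: '\n' :: rest, acc => (acc.reverse ++ ['\r', '\n']) :: splitlinesKeep rest []
  | '\n' :: rest, acc => (acc.reverse ++ ['\n']) :: splitlinesKeep rest []
  | '\r' :: rest, acc => (acc.reverse ++ ['\r']) :: splitlinesKeep rest []
  | c :: rest, acc => splitlinesKeep rest (c :: acc)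

-- A's for-loop over enumerate(lines) with the running current_offset; none = loop fell through
def loopA : List (List Char) → Int → Int → Int → Option (Int × Int)
  | [], _, _, _ => none
  | l :: rest, i, cur, off =>
      if cur + (l.length : Int) > off then some (i + 1, off - cur + 1)
      else loopA rest (i + 1) (cur + (l.length : Int)) off

def offset_to_position (source : String) (offset : Int) : Int × Int :=
  let lines := splitlinesKeep source.toList []
  match loopA lines 0 0 offset with
  | some p => p
  | none =>
      ((lines.length : Int),
       match lines.getLast? with
       | some l => (l.length : Int) + 1
       | none => 1)

-- ===== PORT B =====
-- cum.append(total) loop: cumulative end offsets of the lines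
def buildCum : List (List Char) → Int → List Int
  | [], _ => []
  | l :: rest, total => (total + (l.length : Int)) :: buildCum rest (total + (l.length : Int))

-- the hand-written bisect_right while-loop of Source B
def bisectR (cum : List Int) (off : Int) (lo hi : Nat) : Nat :=
  if _h : lo < hi then
    let mid := (lo + hi) / 2
    if PySem.List.pyGetD cum (mid : Int) 0 ≤ off then bisectR cum off (mid + 1) hi
    else bisectR cum off lo mid
  else lo
termination_by hi - lo
decreasing_by all_goals omega

def offset_to_position_alt (source : String) (offset : Int) : Int × Int :=
  let lines := splitlinesKeep source.toList []
  let cum := buildCum lines 0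
  let lo := bisectR cum offset 0 cum.length
  if lo < lines.length then
    let start := if 0 < lo then PySem.List.pyGetD cum ((lo : Int) - 1) 0 else 0
    ((lo : Int) + 1, offset - start + 1)
  else
    ((lines.length : Int),
     match lines.getLast? with
     | some l => (l.length : Int) + 1
     | none => 1)

-- ===== PRECONDITION & SPEC =====
def Spec_offset_to_position (source : String) (offset : Int) (out : Int × Int) : Prop := out = offset_to_position_alt source offset
instance (source : String) (offset : Int) (out : Int × Int) : Decidable (Spec_offset_to_position source offset out) := by unfold Spec_offset_to_position; infer_instance

-- ===== CLAIM (what is proved, stated in full; the proofs are below) =====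
def Claim_equal_offset_to_position : Prop := ∀ (source : String) (offset : Int), Dom_offset_to_position source offset → Spec_offset_to_position source offset (offset_to_position source offset)

-- ===== LEMMAS AND PROOFS =====

-- sum of the lengths of the first k lines, as an Int
def presumI (lines : List (List Char)) (k : Nat) : Int :=
  (((lines.take k).map List.length).sum : Nat)

theorem sum_take_mono (xs : List Nat) : ∀ a b : Nat, a ≤ b → (xs.take a).sum ≤ (xs.take b).sum := by
  induction xs with
  | nil => intro a b _; simp
  | cons x xs ih =>
      intro a b hab
      cases a with
      | zero => simp
      | succ a' =>
          cases b with
          | zero => omega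
          | succ b' => simpa using ih a' b' (by omega)

theorem presumI_mono (lines : List (List Char)) {a b : Nat} (h : a ≤ b) :
    presumI lines a ≤ presumI lines b := by
  unfold presumI
  have := sum_take_mono (lines.map List.length) a b h
  simp only [← List.map_take] at this
  exact_mod_cast this

theorem presumI_zero (lines : List (List Char)) : presumI lines 0 = 0 := by simp [presumI]

theorem presumI_cons (l : List Char) (lines : List (List Char)) (k : Nat) :
    presumI (l :: lines) (k + 1) = (l.length : Int) + presumI lines k := by
  simp [presumI]

theorem buildCum_length (lines : List (List Char)) : ∀ t, (buildCum lines t).length = lines.length := by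
  induction lines with
  | nil => intro t; simp [buildCum]
  | cons l rest ih => intro t; simp [buildCum, ih]

theorem buildCum_getD (lines : List (List Char)) :
    ∀ (i : Nat) (t : Int), i < lines.length →
      (buildCum lines t).getD i 0 = t + presumI lines (i + 1) := by
  induction lines with
  | nil => intro i t h; simp at h
  | cons l rest ih =>
      intro i t h
      cases i with
      | zero => simp [buildCum, presumI]
      | succ i' =>
          have h' : i' < rest.length := by simpa using h
          simp only [buildCum, List.getD_cons_succ]
          rw [ih i' (t + (l.length : Int)) h', presumI_cons]
          ring

theorem loopA_none (off : Int) :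
    ∀ (lines : List (List Char)) (cur i : Int),
      (∀ j : Nat, j < lines.length → cur + presumI lines (j + 1) ≤ off) →
      loopA lines i cur off = none := by
  intro lines
  induction lines with
  | nil => intro cur i _; rfl
  | cons l rest ih =>
      intro cur i h
      have h0 := h 0 (by simp)
      rw [presumI_cons, presumI_zero] at h0
      simp only [loopA, if_neg (by omega : ¬ cur + (l.length : Int) > off)]
      apply ih
      intro j hj
      have := h (j + 1) (by simpa using Nat.succ_lt_succ hj)
      rw [presumI_cons] at this
      omega

theorem loopA_some (off : Int) :
    ∀ (lines : List (List Char)) (cur i : Int) (j0 : Nat),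
      j0 < lines.length →
      off < cur + presumI lines (j0 + 1) →
      (∀ j : Nat, j < j0 → cur + presumI lines (j + 1) ≤ off) →
      loopA lines i cur off = some (i + (j0 : Int) + 1, off - (cur + presumI lines j0) + 1) := by
  intro lines
  induction lines with
  | nil => intro cur i j0 h; simp at h
  | cons l rest ih =>
      intro cur i j0 hlt hhit hmin
      cases j0 with
      | zero =>
          rw [presumI_cons, presumI_zero] at hhit
          simp only [loopA, if_pos (by omega : cur + (l.length : Int) > off)]
          rw [presumI_zero]
          norm_num
      | succ k =>
          have h0 := hmin 0 (Nat.succ_pos k)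
          rw [presumI_cons, presumI_zero] at h0
          simp only [loopA, if_neg (by omega : ¬ cur + (l.length : Int) > off)]
          rw [presumI_cons] at hhit
          have := ih (cur + (l.length : Int)) (i + 1) k (by simpa using hlt)
            (by omega)
            (by intro j hj
                have := hmin (j + 1) (by omega)
                rw [presumI_cons] at this
                omega)
          rw [this, presumI_cons]
          simp only [Option.some.injEq, Prod.mk.injEq]
          constructor
          · push_cast; ring
          · ring

theorem bisectR_spec (cum : List Int) (off : Int)
    (mono : ∀ j k : Nat, j ≤ k → k < cum.length → cum.getD j 0 ≤ cum.getD k 0) :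
    ∀ (n lo hi : Nat), hi - lo ≤ n → lo ≤ hi → hi ≤ cum.length →
      (∀ j : Nat, j < lo → cum.getD j 0 ≤ off) →
      (∀ j : Nat, hi ≤ j → j < cum.length → off < cum.getD j 0) →
      bisectR cum off lo hi ≤ cum.length ∧
      (∀ j : Nat, j < bisectR cum off lo hi → cum.getD j 0 ≤ off) ∧
      (bisectR cum off lo hi < cum.length → off < cum.getD (bisectR cum off lo hi) 0) := by
  intro n
  induction n with
  | zero =>
      intro lo hi hn hle hhi hlow hup
      have : ¬ lo < hi := by omega
      rw [bisectR, dif_neg this]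
      exact ⟨by omega, hlow, fun h => hup lo (by omega) h⟩
  | succ n ih =>
      intro lo hi hn hle hhi hlow hup
      by_cases hlt : lo < hi
      · rw [bisectR, dif_pos hlt]
        simp only [PySem.List.pyGetD_natCast]
        have hmidlt : (lo + hi) / 2 < hi := by omega
        have hmidge : lo ≤ (lo + hi) / 2 := by omega
        by_cases hc : cum.getD ((lo + hi) / 2) 0 ≤ off
        · rw [if_pos hc]
          apply ih ((lo + hi) / 2 + 1) hi (by omega) (by omega) hhi
          · intro j hj
            exact le_trans (mono j ((lo + hi) / 2) (by omega) (by omega)) hc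
          · exact hup
        · rw [if_neg hc]
          apply ih lo ((lo + hi) / 2) (by omega) (by omega) (by omega) hlow
          · intro j hj hjlen
            exact lt_of_lt_of_le (by omega) (mono ((lo + hi) / 2) j hj hjlen)
      · rw [bisectR, dif_neg hlt]
        exact ⟨by omega, hlow, fun h => hup lo (by omega) h⟩

-- ===== VERDICT (by name: the statement is the Claim_ definition above) =====
theorem offset_to_position_spec : Claim_equal_offset_to_position := by
  intro source offset _dom
  simp only [Spec_offset_to_position, offset_to_position, offset_to_position_alt]
  set lines := splitlinesKeep source.toList [] with hlines
  set cum := buildCum lines 0 with hcum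
  have hcl : cum.length = lines.length := buildCum_length lines 0
  have hgetD : ∀ i : Nat, i < lines.length → cum.getD i 0 = presumI lines (i + 1) := by
    intro i hi
    rw [hcum, buildCum_getD lines i 0 hi]; ring
  have mono : ∀ j k : Nat, j ≤ k → k < cum.length → cum.getD j 0 ≤ cum.getD k 0 := by
    intro j k hjk hk
    rw [hgetD j (by omega), hgetD k (by omega)]
    exact presumI_mono lines (by omega)
  obtain ⟨hr_le, hr_low, hr_hit⟩ :=
    bisectR_spec cum offset mono cum.length 0 cum.length (by omega) (by omega) (le_refl _)
      (by intro j hj; omega) (by intro j hj hjl; omega)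
  set r := bisectR cum offset 0 cum.length with hr
  by_cases hex : ∃ j : Nat, j < lines.length ∧ offset < presumI lines (j + 1)
  · -- some line contains the offset
    obtain ⟨hj0lt, hj0hit⟩ := Nat.find_spec hex
    set j0 := Nat.find hex with hj0
    have hmin' : ∀ j : Nat, j < j0 → presumI lines (j + 1) ≤ offset := by
      intro j hj
      have h := Nat.find_min hex hj
      push_neg at h
      exact h (by omega)
    have hA := loopA_some offset lines 0 0 j0 hj0lt (by simpa using hj0hit)
      (by intro j hj; simpa using hmin' j hj)
    rw [hA]
    show (0 + (j0 : Int) + 1, offset - (0 + presumI lines j0) + 1) = _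
    have hrj : r = j0 := by
      rcases lt_trichotomy r j0 with h | h | h
      · have hrn : r < cum.length := by omega
        have hx := hr_hit hrn
        rw [hgetD r (by omega)] at hx
        exact absurd ⟨by omega, hx⟩ (Nat.find_min hex h)
      · exact h
      · have hx := hr_low j0 h
        rw [hgetD j0 hj0lt] at hx
        omega
    rw [hrj, if_pos (by omega : j0 < lines.length)]
    by_cases h0 : 0 < j0
    · rw [if_pos h0]
      have hcast : ((j0 : Int) - 1) = ((j0 - 1 : Nat) : Int) := by
        push_cast [Nat.cast_sub (by omega : 1 ≤ j0)]; ring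
      rw [hcast]
      simp only [PySem.List.pyGetD_natCast]
      rw [hgetD (j0 - 1) (by omega)]
      have : j0 - 1 + 1 = j0 := by omega
      rw [this]
      simp only [Prod.mk.injEq]
      constructor
      · push_cast; ring
      · ring
    · rw [if_neg h0]
      have hz : j0 = 0 := by omega
      rw [hz, presumI_zero]
      norm_num
  · -- offset is past the end: both take the fall-through branch
    push_neg at hex
    have hA := loopA_none offset lines 0 0
      (by intro j hj; simpa using hex j hj)
    rw [hA]
    show ((lines.length : Int), match lines.getLast? with | some l => (l.length : Int) + 1 | none => 1) = _
    have hrn : ¬ r < lines.length := by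
      intro hcon
      have hx := hr_hit (by omega)
      rw [hgetD r hcon] at hx
      have := hex r hcon
      omega
    rw [if_neg hrn]
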